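-- pv_equiv track=rewrite | github.com/sathish39893/AutoIncrementCompile | ObjectListGenerator.py | getModifiedInfo
-- ===== SOURCE A (Python) =====
-- def getModifiedInfo(objUpdInfo):
-- 	ObjTypeList ={'Modified':['UPD','UPDATED','UPDATE','EDIT','MODIFIED'],
-- 				'New':['ADD','ADDED','NEW']
-- 				}
-- 	for k in ObjTypeList:
-- 		if k == objUpdInfo:
-- 			return k
-- 		else:
-- 			for v in ObjTypeList[k]:
-- 				if objUpdInfo.upper() == v:
-- 					return k
-- 	return None
-- ===== SOURCE B (Python) =====
-- _REVERSE_MAP = {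
--     'UPD': 'Modified', 'UPDATED': 'Modified', 'UPDATE': 'Modified',
--     'EDIT': 'Modified', 'MODIFIED': 'Modified',
--     'ADD': 'New', 'ADDED': 'New', 'NEW': 'New',
-- }
--
-- def getModifiedInfo(objUpdInfo):
--     return _REVERSE_MAP.get(objUpdInfo.upper())
-- ===== Notes on version B (the rewrite author's own statement) =====
-- stated objective: simpler
-- what changed: Replaced the nested loops over a category->aliases dict (plus a redundant key-equality branch) with one precomputed flat alias->category dict and a single .get on the uppercased input.
import Mathlib
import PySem

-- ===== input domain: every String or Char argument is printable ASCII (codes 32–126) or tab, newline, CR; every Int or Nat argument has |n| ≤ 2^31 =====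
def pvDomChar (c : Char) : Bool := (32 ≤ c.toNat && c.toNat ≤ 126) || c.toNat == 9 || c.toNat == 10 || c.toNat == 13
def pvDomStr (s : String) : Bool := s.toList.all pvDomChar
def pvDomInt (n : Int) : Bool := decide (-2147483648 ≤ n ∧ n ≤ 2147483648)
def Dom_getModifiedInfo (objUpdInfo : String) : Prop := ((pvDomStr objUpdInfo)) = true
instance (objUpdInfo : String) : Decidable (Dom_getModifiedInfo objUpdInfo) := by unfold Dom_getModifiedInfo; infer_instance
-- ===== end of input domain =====

-- ===== PORT A =====
-- B replaces A's nested loops with one flat alias->category dict lookup (simpler).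

def pvModAliases : List String := ["UPD", "UPDATED", "UPDATE", "EDIT", "MODIFIED"]
def pvNewAliases : List String := ["ADD", "ADDED", "NEW"]

-- inner loop: for v in ObjTypeList[k]: if objUpdInfo.upper() == v: return k
def pvScanAliases (u : String) (k : String) : List String → Option String
  | [] => none
  | v :: rest => if u = v then some k else pvScanAliases u k rest

def getModifiedInfo (objUpdInfo : String) : Option String :=
  -- for k in ObjTypeList (insertion order: 'Modified' then 'New')
  if "Modified" = objUpdInfo then some "Modified"
  else
    match pvScanAliases (PySem.Str.upper objUpdInfo) "Modified" pvModAliases with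
    | some r => some r
    | none =>
      if "New" = objUpdInfo then some "New"
      else
        match pvScanAliases (PySem.Str.upper objUpdInfo) "New" pvNewAliases with
        | some r => some r
        | none => none

-- ===== PORT B =====
def pvReverseMap : PySem.Dict String String :=
  PySem.Dict.ofList [("UPD", "Modified"), ("UPDATED", "Modified"), ("UPDATE", "Modified"),
                     ("EDIT", "Modified"), ("MODIFIED", "Modified"),
                     ("ADD", "New"), ("ADDED", "New"), ("NEW", "New")]

def getModifiedInfo_alt (objUpdInfo : String) : Option String :=
  PySem.Dict.get? pvReverseMap (PySem.Str.upper objUpdInfo)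

-- ===== PRECONDITION & SPEC =====
def Spec_getModifiedInfo (objUpdInfo : String) (out : Option String) : Prop := out = getModifiedInfo_alt objUpdInfo
instance (objUpdInfo : String) (out : Option String) : Decidable (Spec_getModifiedInfo objUpdInfo out) := by unfold Spec_getModifiedInfo; infer_instance

-- ===== CLAIM (what is proved, stated in full; the proofs are below) =====
def Claim_equal_getModifiedInfo : Prop := ∀ (objUpdInfo : String), Dom_getModifiedInfo objUpdInfo → Spec_getModifiedInfo objUpdInfo (getModifiedInfo objUpdInfo)

-- ===== LEMMAS AND PROOFS =====

theorem pv_eq_general (s : String) (h1 : "Modified" ≠ s) (h2 : "New" ≠ s) :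
    getModifiedInfo s = getModifiedInfo_alt s := by
  unfold getModifiedInfo getModifiedInfo_alt
  rw [if_neg h1]
  have hmap : pvReverseMap = PySem.Dict.mk
      [("UPD", "Modified"), ("UPDATED", "Modified"), ("UPDATE", "Modified"),
       ("EDIT", "Modified"), ("MODIFIED", "Modified"),
       ("ADD", "New"), ("ADDED", "New"), ("NEW", "New")] := by decide
  rw [hmap]
  generalize PySem.Str.upper s = u
  by_cases h3 : u = "UPD"
  · subst h3; simp [pvScanAliases, pvModAliases, PySem.Dict.get?_mk_cons]
  by_cases h4 : u = "UPDATED"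
  · subst h4; simp [pvScanAliases, pvModAliases, PySem.Dict.get?_mk_cons]
  by_cases h5 : u = "UPDATE"
  · subst h5; simp [pvScanAliases, pvModAliases, PySem.Dict.get?_mk_cons]
  by_cases h6 : u = "EDIT"
  · subst h6; simp [pvScanAliases, pvModAliases, PySem.Dict.get?_mk_cons]
  by_cases h7 : u = "MODIFIED"
  · subst h7; simp [pvScanAliases, pvModAliases, PySem.Dict.get?_mk_cons]
  by_cases h8 : u = "ADD"
  · subst h8
    simp [pvScanAliases, pvModAliases, pvNewAliases, PySem.Dict.get?_mk_cons, h2]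
  by_cases h9 : u = "ADDED"
  · subst h9
    simp [pvScanAliases, pvModAliases, pvNewAliases, PySem.Dict.get?_mk_cons, h2]
  by_cases h10 : u = "NEW"
  · subst h10
    simp [pvScanAliases, pvModAliases, pvNewAliases, PySem.Dict.get?_mk_cons, h2]
  simp only [pvScanAliases, pvModAliases, pvNewAliases, if_neg h2, if_neg h3, if_neg h4,
    if_neg h5, if_neg h6, if_neg h7, if_neg h8, if_neg h9, if_neg h10]
  have e3 : ("UPD" == u) = false := beq_eq_false_iff_ne.mpr (Ne.symm h3)
  have e4 : ("UPDATED" == u) = false := beq_eq_false_iff_ne.mpr (Ne.symm h4)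
  have e5 : ("UPDATE" == u) = false := beq_eq_false_iff_ne.mpr (Ne.symm h5)
  have e6 : ("EDIT" == u) = false := beq_eq_false_iff_ne.mpr (Ne.symm h6)
  have e7 : ("MODIFIED" == u) = false := beq_eq_false_iff_ne.mpr (Ne.symm h7)
  have e8 : ("ADD" == u) = false := beq_eq_false_iff_ne.mpr (Ne.symm h8)
  have e9 : ("ADDED" == u) = false := beq_eq_false_iff_ne.mpr (Ne.symm h9)
  have e10 : ("NEW" == u) = false := beq_eq_false_iff_ne.mpr (Ne.symm h10)
  simp [PySem.Dict.get?, List.find?, e3, e4, e5, e6, e7, e8, e9, e10]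

-- ===== VERDICT (by name: the statement is the Claim_ definition above) =====
theorem getModifiedInfo_spec : Claim_equal_getModifiedInfo := by
  intro s _
  unfold Spec_getModifiedInfo
  by_cases h1 : "Modified" = s
  · subst h1; decide
  · by_cases h2 : "New" = s
    · subst h2; decide
    · exact pv_eq_general s h1 h2
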